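-- pv_equiv track=rewrite | github.com/MrBrantCode/unitest_baseline | mut_generate/mist_train_taco/taco_9613/solution.py | find_x_N_1
-- ===== SOURCE A (Python) =====
-- def find_x_N_1(N, a):
--     def myc(n):
--         ret = 0
--         while n % 2 == 0:
--             ret += 1
--             n //= 2
--         return ret
--
--     def func(c):
--         odd = 0
--         count = 0
--         if a[0] == c:
--             count += 1
--         if a[-1] == c:
--             count += 1
--         for i in range(1, N // 2):
--             odd += myc(N - i) - myc(i)
--             if a[i] == c and odd == 0:
--                 count += 1
--             if a[-i - 1] == c and odd == 0:
--                 count += 1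
--         if N % 2 == 1:
--             if a[N // 2] == c and odd + myc(N // 2 + 1) - myc(N // 2) == 0:
--                 count += 1
--         return count % 2 == 0
--
--     if '2' in a:
--         if func('2'):
--             return 0
--         else:
--             return 1
--     elif func('3'):
--         return 0
--     else:
--         return 2
-- ===== SOURCE B (Python) =====
-- def find_x_N_1(N, a):
--     # Staged rewrite: first build, independently of the string, the list of
--     # positions whose palindromic coefficient is odd (stateless popcount test,
--     # replacing A's myc helper and running 'odd' accumulator), then count the
--     # relevant digit at exactly those positions.
--     def pc(n):
--         return bin(n).count('1')
--
--     half = N // 2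
--     idxs = [0, -1]
--     for i in range(1, half):
--         if pc(i) + pc(N - 1 - i) == pc(N - 1):
--             idxs += [i, -i - 1]
--     if N % 2 == 1 and pc(half) + pc(N - 1 - half) == pc(N - 1):
--         idxs.append(half)
--
--     c = '2' if '2' in a else '3'
--     even = sum(1 for j in idxs if a[j] == c) % 2 == 0
--     if c == '2':
--         return 0 if even else 1
--     return 0 if even else 2
-- ===== Notes on version B (the rewrite author's own statement) =====
-- stated objective: alternative
-- what changed: A's myc (2-adic valuation) helper and the running 'odd' accumulator are gone: B first builds, independently of the string, the list of positions whose coefficient is odd via the stateless popcount identity pc(i)+pc(N-1-i)==pc(N-1), then in a second stage counts the relevant digit at those positions and takes the parity.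
import Mathlib
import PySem

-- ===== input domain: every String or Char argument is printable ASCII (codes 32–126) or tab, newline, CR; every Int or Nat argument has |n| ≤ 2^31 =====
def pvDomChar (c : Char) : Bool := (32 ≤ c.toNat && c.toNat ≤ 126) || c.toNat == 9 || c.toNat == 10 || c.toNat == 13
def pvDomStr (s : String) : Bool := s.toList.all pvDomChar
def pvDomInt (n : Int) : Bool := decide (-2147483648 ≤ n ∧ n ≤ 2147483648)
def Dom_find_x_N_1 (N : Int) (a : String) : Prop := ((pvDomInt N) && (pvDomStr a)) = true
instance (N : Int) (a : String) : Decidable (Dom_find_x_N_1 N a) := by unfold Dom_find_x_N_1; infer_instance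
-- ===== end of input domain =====

-- B replaces A's myc helper and running 'odd' accumulator by a two-stage computation:
-- it first builds the list of counted positions via a stateless popcount test, then
-- counts the digit at those positions (objective: alternative, same cost).


-- ===== PORT A =====
-- while n % 2 == 0: ret += 1; n //= 2   (fuel |n|+1 suffices whenever the Python loop terminates, i.e. n ≠ 0)
def mycGo : Nat → Int → Int → Int
  | 0, _, ret => ret
  | fuel+1, n, ret =>
    if PySem.Int.mod n 2 = 0 then mycGo fuel (PySem.Int.floordiv n 2) (ret + 1) else ret

def myc (n : Int) : Int := mycGo (n.natAbs + 1) n 0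

-- func(c) of A: the loop carries the pair (odd, count)
def funcA (N : Int) (a : List Char) (c : Char) : Bool :=
  let count0 : Int :=
    (if PySem.List.pyGetD a 0 ' ' = c then (1 : Int) else 0) +
    (if PySem.List.pyGetD a (-1) ' ' = c then 1 else 0)
  let st := (PySem.List.pyRange 1 (PySem.Int.floordiv N 2) 1).foldl
    (fun (s : Int × Int) i =>
      let odd := s.1 + myc (N - i) - myc i
      (odd,
        s.2 + (if PySem.List.pyGetD a i ' ' = c ∧ odd = 0 then 1 else 0)
            + (if PySem.List.pyGetD a (-i - 1) ' ' = c ∧ odd = 0 then 1 else 0)))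
    (0, count0)
  let cnt : Int :=
    if PySem.Int.mod N 2 = 1 then
      if PySem.List.pyGetD a (PySem.Int.floordiv N 2) ' ' = c ∧
         st.1 + myc (PySem.Int.floordiv N 2 + 1) - myc (PySem.Int.floordiv N 2) = 0
      then st.2 + 1 else st.2
    else st.2
  PySem.Int.mod cnt 2 == 0

def find_x_N_1 (N : Int) (a : String) : Int :=
  if PySem.Str.isIn "2" a then
    if funcA N a.toList '2' then 0 else 1
  else
    if funcA N a.toList '3' then 0 else 2

-- ===== PORT B =====
-- pc(n) = bin(n).count('1')  (popcount of |n|) is PySem.Int.bitCount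
def okB (N i : Int) : Bool :=
  PySem.Int.bitCount i + PySem.Int.bitCount (N - 1 - i) == PySem.Int.bitCount (N - 1)

-- stage 1 of B: the list of counted positions, built without looking at the string
def idxsB (N : Int) : List Int :=
  let half := PySem.Int.floordiv N 2
  let base := (PySem.List.pyRange 1 half 1).foldl
    (fun (js : List Int) i => if okB N i then js ++ [i, -i - 1] else js) [0, -1]
  if PySem.Int.mod N 2 = 1 ∧ okB N half then base ++ [half] else base

def find_x_N_1_alt (N : Int) (a : String) : Int :=
  let c : Char := if PySem.Str.isIn "2" a then '2' else '3'
  let even : Bool :=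
    (idxsB N).countP (fun j => PySem.List.pyGetD a.toList j ' ' == c) % 2 == 0
  if c == '2' then (if even then 0 else 1) else (if even then 0 else 2)

-- ===== PRECONDITION & SPEC =====
-- Pre_ describes exactly the inputs on which the Python A returns: a nonempty, every index
-- the loop and the N-odd middle access in range, and not the two divergent corners
-- (N = 1 with a[0] == c, N = -1 with a[-1] == c, where myc(0) loops forever).
def Pre_find_x_N_1 (N : Int) (a : String) : Prop :=
  1 ≤ (a.toList.length : Int) ∧
  (2 ≤ PySem.Int.floordiv N 2 → PySem.Int.floordiv N 2 ≤ (a.toList.length : Int)) ∧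
  (PySem.Int.mod N 2 = 1 →
     (-(a.toList.length : Int) ≤ PySem.Int.floordiv N 2 ∧
       PySem.Int.floordiv N 2 < (a.toList.length : Int)) ∧
     ¬(N = 1 ∧ PySem.List.pyGetD a.toList 0 ' ' =
         (if PySem.Str.isIn "2" a then '2' else '3')) ∧
     ¬(N = -1 ∧ PySem.List.pyGetD a.toList (-1) ' ' =
         (if PySem.Str.isIn "2" a then '2' else '3')))
instance (N : Int) (a : String) : Decidable (Pre_find_x_N_1 N a) := by
  unfold Pre_find_x_N_1; infer_instance

def pvWitness_find_x_N_1 : Int × String := (6, "201102")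

def Spec_find_x_N_1 (N : Int) (a : String) (out : Int) : Prop := out = find_x_N_1_alt N a
instance (N : Int) (a : String) (out : Int) : Decidable (Spec_find_x_N_1 N a out) := by
  unfold Spec_find_x_N_1; infer_instance

-- ===== CLAIM (what is proved, stated in full; the proofs are below) =====
def Claim_equal_find_x_N_1 : Prop := ∀ (N : Int) (a : String),
  Dom_find_x_N_1 N a → Pre_find_x_N_1 N a → Spec_find_x_N_1 N a (find_x_N_1 N a)

-- ===== LEMMAS AND PROOFS =====

-- v2N m = 2-adic valuation of m (proof-side mirror of A's while loop on Nat)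
def v2N : Nat → Nat
  | 0 => 0
  | m+1 => if (m+1) % 2 = 0 then v2N ((m+1)/2) + 1 else 0

theorem v2N_eq (m : Nat) (h : 1 ≤ m) :
    v2N m = if m % 2 = 0 then v2N (m / 2) + 1 else 0 := by
  cases m with
  | zero => omega
  | succ k => rw [v2N]

theorem mycGo_eq_v2N (fuel : Nat) : ∀ (m : Nat) (ret : Int), 1 ≤ m → m ≤ fuel →
    mycGo fuel (m : Int) ret = ret + (v2N m : Int) := by
  induction fuel with
  | zero => intro m ret h1 h2; omega
  | succ f ih =>
    intro m ret h1 h2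
    have hmod : PySem.Int.mod (m : Int) 2 = ((m % 2 : Nat) : Int) := by
      exact_mod_cast PySem.Int.mod_natCast m 2
    have hdiv : PySem.Int.floordiv (m : Int) 2 = ((m / 2 : Nat) : Int) := by
      exact_mod_cast PySem.Int.floordiv_natCast m 2
    have hc : (PySem.Int.mod (m : Int) 2 = 0) ↔ m % 2 = 0 := by
      rw [hmod]; exact Nat.cast_eq_zero
    rw [v2N_eq m h1]
    by_cases he : m % 2 = 0
    · rw [show mycGo (f+1) (m : Int) ret
            = mycGo f (PySem.Int.floordiv (m : Int) 2) (ret + 1) from by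
          simp only [mycGo]; rw [if_pos (hc.mpr he)]]
      rw [hdiv, ih (m / 2) (ret + 1) (by omega) (by omega)]
      rw [if_pos he]; push_cast; ring
    · rw [show mycGo (f+1) (m : Int) ret = ret from by
          simp only [mycGo]; rw [if_neg (fun hx => he (hc.mp hx))]]
      rw [if_neg he]; simp

theorem myc_eq_v2N (n : Int) (h : 1 ≤ n) : myc n = (v2N n.toNat : Int) := by
  obtain ⟨m, rfl⟩ : ∃ m : Nat, (m : Int) = n := ⟨n.toNat, by omega⟩
  rw [myc]
  simp only [Int.natAbs_natCast, Int.toNat_natCast]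
  rw [mycGo_eq_v2N (m + 1) m 0 (by omega) (by omega)]
  simp

-- popcount step: pc(m) = pc(m-1) + 1 - v2(m) for m ≥ 1
theorem bitCount_step (m : Nat) (h : 1 ≤ m) :
    PySem.Int.bitCount (m : Int) + v2N m = PySem.Int.bitCount ((m - 1 : Nat) : Int) + 1 := by
  induction m using Nat.strong_induction_on with
  | _ m ih =>
    rcases Nat.lt_or_ge m 2 with hm | hm
    · interval_cases m
      · have h1 := PySem.Int.bitCount_natCast (m := 1) (by omega)
        rw [v2N_eq 1 (by omega)]
        norm_num at h1 ⊢
        all_goals omega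
    · have hbc := PySem.Int.bitCount_natCast (m := m) (by omega)
      rw [v2N_eq m h]
      by_cases he : m % 2 = 0
      · have hk1 : 1 ≤ m / 2 := by omega
        have ihk := ih (m / 2) (by omega) hk1
        have hbc1 := PySem.Int.bitCount_natCast (m := m - 1) (by omega)
        have e1 : (m - 1) % 2 = 1 := by omega
        have e2 : (m - 1) / 2 = m / 2 - 1 := by omega
        rw [e1, e2] at hbc1
        rw [if_pos he]
        omega
      · have hbc1 := PySem.Int.bitCount_natCast (m := m - 1) (by omega)
        have e1 : (m - 1) % 2 = 0 := by omega
        have e2 : (m - 1) / 2 = m / 2 := by omega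
        rw [e1, e2] at hbc1
        have e3 : m % 2 = 1 := by omega
        rw [e3] at hbc
        rw [if_neg he]
        omega

-- the invariant value of A's accumulator
def Sv (N i : Int) : Int :=
  (PySem.Int.bitCount i : Int) + (PySem.Int.bitCount (N - 1 - i) : Int)
    - (PySem.Int.bitCount (N - 1) : Int)

theorem bitCount_step_int (n : Int) (h : 1 ≤ n) :
    (PySem.Int.bitCount n : Int) = (PySem.Int.bitCount (n - 1) : Int) + 1 - myc n := by
  obtain ⟨m, rfl⟩ : ∃ m : Nat, (m : Int) = n := ⟨n.toNat, by omega⟩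
  have hm : 1 ≤ m := by omega
  have h2 : ((m - 1 : Nat) : Int) = (m : Int) - 1 := by omega
  have hstep := bitCount_step m hm
  rw [myc_eq_v2N _ h, ← h2]
  simp only [Int.toNat_natCast]
  omega

theorem Sv_step (N i : Int) (hi : 1 ≤ i) (hNi : 1 ≤ N - i) :
    Sv N i = Sv N (i - 1) + myc (N - i) - myc i := by
  unfold Sv
  have e1 := bitCount_step_int i hi
  have e2 := bitCount_step_int (N - i) hNi
  have e3 : N - 1 - (i - 1) = N - i := by ring
  have e4 : N - i - 1 = N - 1 - i := by ring
  rw [e3, ← e4]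
  omega

theorem okB_iff (N i : Int) : okB N i = true ↔ Sv N i = 0 := by
  unfold okB Sv
  rw [beq_iff_eq]
  omega

theorem bitCount_pos (m : Nat) (h : 1 ≤ m) : 1 ≤ PySem.Int.bitCount (m : Int) := by
  induction m using Nat.strong_induction_on with
  | _ m ih =>
    have hbc := PySem.Int.bitCount_natCast (m := m) (by omega)
    by_cases he : m % 2 = 0
    · have := ih (m / 2) (by omega) (by omega)
      omega
    · omega

theorem mycGo_ge (fuel : Nat) : ∀ (n ret : Int), ret ≤ mycGo fuel n ret := by
  induction fuel with
  | zero => intro n ret; simp [mycGo]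
  | succ f ih =>
    intro n ret
    simp only [mycGo]
    split
    · exact le_trans (by omega) (ih _ (ret + 1))
    · exact le_refl ret

theorem myc_odd (n : Int) (h : PySem.Int.mod n 2 ≠ 0) : myc n = 0 := by
  rw [myc]; simp only [mycGo]; rw [if_neg h]

theorem myc_even_pos (n : Int) (h : PySem.Int.mod n 2 = 0) : 1 ≤ myc n := by
  rw [show myc n = mycGo n.natAbs (PySem.Int.floordiv n 2) 1 from by
    rw [myc]; simp only [mycGo]; rw [if_pos h]; norm_num]
  exact mycGo_ge n.natAbs _ 1

-- stage-1 list of B, i at a time (for the proofs only)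
def gB (N i : Int) : List Int := if okB N i then [i, -i - 1] else []

theorem idxsB_flatMap (N : Int) :
    idxsB N =
      (if PySem.Int.mod N 2 = 1 ∧ okB N (PySem.Int.floordiv N 2)
       then ([0, -1] ++ (PySem.List.pyRange 1 (PySem.Int.floordiv N 2) 1).flatMap (gB N))
              ++ [PySem.Int.floordiv N 2]
       else [0, -1] ++ (PySem.List.pyRange 1 (PySem.Int.floordiv N 2) 1).flatMap (gB N)) := by
  have hf : (fun (js : List Int) i => if okB N i then js ++ [i, -i - 1] else js)
      = (fun (js : List Int) i => js ++ gB N i) := by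
    funext js i; unfold gB; split <;> simp
  simp only [idxsB]
  rw [hf, PySem.List.foldl_append_eq_flatMap]

-- indicator bridge between A's Prop test and B's Bool test
theorem ind_bridge (a : List Char) (c : Char) (j : Int) :
    (if PySem.List.pyGetD a j ' ' = c then (1 : Int) else 0)
      = ((if (PySem.List.pyGetD a j ' ' == c) = true then (1 : Nat) else 0) : Int) := by
  by_cases h : PySem.List.pyGetD a j ' ' = c
  · simp [h]
  · simp [h]

-- loop invariant: A's fold's state is (Sv N k, count0 + matches among B's stage-1 list so far)
theorem loop_inv (N : Int) (a : List Char) (c : Char) (count0 : Int) :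
    ∀ (k : Nat), (1 + k : Int) ≤ N →
    (PySem.List.pyRange 1 (1 + k) 1).foldl
      (fun (s : Int × Int) i =>
        (s.1 + myc (N - i) - myc i,
          s.2 + (if PySem.List.pyGetD a i ' ' = c ∧ s.1 + myc (N - i) - myc i = 0 then 1 else 0)
              + (if PySem.List.pyGetD a (-i - 1) ' ' = c ∧ s.1 + myc (N - i) - myc i = 0 then 1 else 0)))
      (0, count0)
    = (Sv N k,
       count0 + (((PySem.List.pyRange 1 (1 + k) 1).flatMap (gB N)).countP
                   (fun j => PySem.List.pyGetD a j ' ' == c) : Int)) := by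
  intro k
  induction k with
  | zero =>
    intro _
    rw [show (1 + ((0:Nat):Int)) = 1 from by norm_num]
    rw [PySem.List.pyRange_one_eq_nil (le_refl 1)]
    simp only [List.foldl_nil, List.flatMap_nil, List.countP_nil, Nat.cast_zero, add_zero]
    have hz : Sv N 0 = 0 := by
      simp [Sv, PySem.Int.bitCount_zero]
    rw [hz]
  | succ k ih =>
    intro hk
    have hk' : (1 + k : Int) ≤ N := by push_cast at hk ⊢; omega
    have hb : (1 : Int) ≤ 1 + k := by omega
    rw [show ((1 : Int) + ((k+1:Nat):Int)) = (1 + (k:Int)) + 1 from by push_cast; ring]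
    rw [PySem.List.pyRange_one_succ_right hb, List.foldl_append, ih hk']
    simp only [List.foldl_cons, List.foldl_nil, List.flatMap_append, List.countP_append]
    have hSv : Sv N ((k:Int) + 1) = Sv N k + myc (N - (1 + k)) - myc (1 + k) := by
      have h1 : ((k:Int) + 1) = 1 + (k:Int) := by ring
      rw [h1]
      have hs := Sv_step N (1 + k) (by omega) (by push_cast at hk; omega)
      have h2 : (1 : Int) + k - 1 = (k : Int) := by ring
      rw [h2] at hs
      exact hs
    refine Prod.ext ?_ ?_
    · simpa using hSv.symm
    · simp only
      rw [← hSv]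
      by_cases hz : Sv N ((k:Int) + 1) = 0
      · have hok : okB N (1 + (k:Int)) = true := by
          rw [okB_iff, show (1 + (k:Int)) = ((k:Int) + 1) from by ring]; exact hz
        simp only [List.flatMap_cons, List.flatMap_nil, List.append_nil, gB, hok, if_true]
        simp only [List.countP_cons, List.countP_nil, hz, and_true]
        rw [ind_bridge a c (1 + k), ind_bridge a c (-(1 + (k:Int)) - 1)]
        push_cast
        ring
      · have hok : okB N (1 + (k:Int)) = false := by
          rw [← Bool.not_eq_true, okB_iff, show (1 + (k:Int)) = ((k:Int) + 1) from by ring]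
          exact hz
        simp [gB, hok, hz]

-- parity of an Int that is a Nat cast, as a Bool
theorem parity_cast (n : Nat) :
    (PySem.Int.mod (n : Int) 2 == 0) = (n % 2 == 0) := by
  have h : PySem.Int.mod (n : Int) 2 = ((n % 2 : Nat) : Int) := by
    exact_mod_cast PySem.Int.mod_natCast n 2
  rw [h]
  by_cases he : n % 2 = 0
  · simp [he]
  · have h1 : n % 2 = 1 := by omega
    simp [h1]

theorem parity_eq (x : Int) (n : Nat) (h : x = (n : Int)) :
    (PySem.Int.mod x 2 == 0) = (n % 2 == 0) := by
  rw [h, parity_cast]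

theorem func_eq (N : Int) (a : List Char) (c : Char)
    (h1 : ¬(N = 1 ∧ PySem.List.pyGetD a 0 ' ' = c))
    (hm1 : ¬(N = -1 ∧ PySem.List.pyGetD a (-1) ' ' = c)) :
    funcA N a c
      = ((idxsB N).countP (fun j => PySem.List.pyGetD a j ' ' == c) % 2 == 0) := by
  have hdm := PySem.Int.floordiv_mul_add_mod N 2
  have hm0 := PySem.Int.mod_nonneg N (b := 2) (by norm_num)
  have hml := PySem.Int.mod_lt N (b := 2) (by norm_num)
  have hcnt0 : ((if PySem.List.pyGetD a 0 ' ' = c then (1 : Int) else 0) +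
      (if PySem.List.pyGetD a (-1) ' ' = c then 1 else 0))
      = (([0, -1] : List Int).countP (fun j => PySem.List.pyGetD a j ' ' == c) : Int) := by
    simp only [List.countP_cons, List.countP_nil]
    rw [ind_bridge a c 0, ind_bridge a c (-1)]
    push_cast; ring
  rw [idxsB_flatMap]
  simp only [funcA]
  by_cases hN : 1 ≤ PySem.Int.floordiv N 2
  · have hrange : (1 : Int) + (((PySem.Int.floordiv N 2 - 1).toNat : Nat) : Int)
        = PySem.Int.floordiv N 2 := by omega
    have hinv := loop_inv N a c
      ((if PySem.List.pyGetD a 0 ' ' = c then (1 : Int) else 0) +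
       (if PySem.List.pyGetD a (-1) ' ' = c then 1 else 0))
      (PySem.Int.floordiv N 2 - 1).toNat (by omega)
    rw [hrange] at hinv
    simp only [hinv]
    by_cases hr1 : PySem.Int.mod N 2 = 1
    · rw [if_pos hr1]
      have hcond : (Sv N (((PySem.Int.floordiv N 2 - 1).toNat : Nat) : Int)
            + myc (PySem.Int.floordiv N 2 + 1) - myc (PySem.Int.floordiv N 2) = 0)
          ↔ okB N (PySem.Int.floordiv N 2) = true := by
        have hs := Sv_step N (PySem.Int.floordiv N 2) (by omega) (by omega)
        have hNu : N - PySem.Int.floordiv N 2 = PySem.Int.floordiv N 2 + 1 := by omega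
        rw [hNu] at hs
        have hk : (((PySem.Int.floordiv N 2 - 1).toNat : Nat) : Int)
            = PySem.Int.floordiv N 2 - 1 := by omega
        rw [hk, okB_iff, hs]
      simp only [propext hcond]
      by_cases hC : PySem.List.pyGetD a (PySem.Int.floordiv N 2) ' ' = c ∧
          okB N (PySem.Int.floordiv N 2) = true
      · have hB : PySem.Int.mod N 2 = 1 ∧ okB N (PySem.Int.floordiv N 2) = true := ⟨hr1, hC.2⟩
        rw [if_pos hC, if_pos hB]
        have hmidc : PySem.List.pyGetD a (N / 2) ' ' = c := by
          have hx := hC.1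
          rwa [PySem.Int.floordiv_eq_ediv_of_pos (by norm_num : (0:Int) < 2)] at hx
        apply parity_eq
        simp [List.countP_append, List.countP_cons, List.countP_nil, beq_iff_eq, hmidc]
        split_ifs <;> omega
      · have hB : ¬(PySem.Int.mod N 2 = 1 ∧ okB N (PySem.Int.floordiv N 2) = true) ∨
            (PySem.Int.mod N 2 = 1 ∧ okB N (PySem.Int.floordiv N 2) = true) := by tauto
        rw [if_neg hC]
        rcases hB with hB | hB
        · rw [if_neg hB]
          apply parity_eq
          simp [List.countP_cons, beq_iff_eq]
          split_ifs <;> omega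
        · rw [if_pos hB]
          have hch : ¬(PySem.List.pyGetD a (PySem.Int.floordiv N 2) ' ' = c) :=
            fun hx => hC ⟨hx, hB.2⟩
          have hmidc : ¬(PySem.List.pyGetD a (N / 2) ' ' = c) := by
            rwa [PySem.Int.floordiv_eq_ediv_of_pos (by norm_num : (0:Int) < 2)] at hch
          apply parity_eq
          simp [List.countP_append, List.countP_cons, List.countP_nil, beq_iff_eq, hmidc]
          split_ifs <;> omega
    · have hB : ¬(PySem.Int.mod N 2 = 1 ∧ okB N (PySem.Int.floordiv N 2) = true) :=
        fun hx => hr1 hx.1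
      rw [if_neg hr1, if_neg hB]
      apply parity_eq
      simp [List.countP_cons, beq_iff_eq]
      split_ifs <;> omega
  · -- empty loop: N//2 ≤ 0
    have hnil : PySem.List.pyRange 1 (PySem.Int.floordiv N 2) 1 = [] :=
      PySem.List.pyRange_one_eq_nil (by omega)
    rw [hnil]
    simp only [List.foldl_nil, List.flatMap_nil, List.append_nil]
    by_cases hr1 : PySem.Int.mod N 2 = 1
    · rw [if_pos hr1]
      rcases (show N = 1 ∨ N = -1 ∨ N ≤ -3 by omega) with hc1 | hc1 | hc1
      · -- N = 1: Pre_ guarantees the middle character differs from c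
        have hu0 : PySem.Int.floordiv N 2 = 0 := by omega
        have hch : ¬(PySem.List.pyGetD a 0 ' ' = c) := fun h => h1 ⟨hc1, h⟩
        rw [hu0]
        have hokB : okB N 0 = true := by
          rw [okB_iff]; simp [Sv]
        have hA : ¬(PySem.List.pyGetD a 0 ' ' = c ∧
            (0:Int) + myc (0 + 1) - myc 0 = 0) := fun hx => hch hx.1
        have hB : PySem.Int.mod N 2 = 1 ∧ okB N 0 = true := ⟨hr1, hokB⟩
        rw [if_neg hA, if_pos hB]
        apply parity_eq
        simp [List.countP_cons, List.countP_nil, beq_iff_eq, hch]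
      · -- N = -1
        have hu0 : PySem.Int.floordiv N 2 = -1 := by omega
        have hch : ¬(PySem.List.pyGetD a (-1) ' ' = c) := fun h => hm1 ⟨hc1, h⟩
        rw [hu0]
        have hokB : okB N (-1) = false := by
          subst hc1; decide
        have hA : ¬(PySem.List.pyGetD a (-1) ' ' = c ∧
            (0:Int) + myc (-1 + 1) - myc (-1) = 0) := fun hx => hch hx.1
        have hB : ¬(PySem.Int.mod N 2 = 1 ∧ okB N (-1) = true) := by
          simp [hokB]
        rw [if_neg hA, if_neg hB]
        apply parity_eq
        simp [List.countP_cons, List.countP_nil, beq_iff_eq]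
        split_ifs <;> omega
      · -- N ≤ -3 odd: neither program counts the middle position
        have hu2 : PySem.Int.floordiv N 2 ≤ -2 := by omega
        have hAfalse : ¬((0:Int) + myc (PySem.Int.floordiv N 2 + 1)
            - myc (PySem.Int.floordiv N 2) = 0) := by
          have hmu : PySem.Int.mod (PySem.Int.floordiv N 2) 2
              = PySem.Int.floordiv N 2 % 2 := PySem.Int.mod_eq_emod_of_pos (by norm_num)
          have hmu1 : PySem.Int.mod (PySem.Int.floordiv N 2 + 1) 2
              = (PySem.Int.floordiv N 2 + 1) % 2 := PySem.Int.mod_eq_emod_of_pos (by norm_num)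
          by_cases hpe : PySem.Int.mod (PySem.Int.floordiv N 2) 2 = 0
          · have hge := myc_even_pos _ hpe
            have hodd1 : PySem.Int.mod (PySem.Int.floordiv N 2 + 1) 2 ≠ 0 := by
              rw [hmu1]; rw [hmu] at hpe; omega
            rw [myc_odd _ hodd1]
            omega
          · have hz := myc_odd _ hpe
            have hev1 : PySem.Int.mod (PySem.Int.floordiv N 2 + 1) 2 = 0 := by
              rw [hmu1]; rw [hmu] at hpe; omega
            have hge := myc_even_pos _ hev1
            omega
        have hBfalse : ¬(okB N (PySem.Int.floordiv N 2) = true) := by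
          rw [okB_iff]
          obtain ⟨m, hm⟩ : ∃ m : Nat, (PySem.Int.floordiv N 2) = -(m : Int) :=
            ⟨(-(PySem.Int.floordiv N 2)).toNat, by omega⟩
          have hm2 : 2 ≤ m := by omega
          have e5 : N - 1 - PySem.Int.floordiv N 2 = PySem.Int.floordiv N 2 := by omega
          have e6 : N - 1 = -((2 * m : Nat) : Int) := by push_cast; omega
          rw [Sv, e5, e6, hm, PySem.Int.bitCount_neg, PySem.Int.bitCount_neg]
          have hdbl := PySem.Int.bitCount_natCast (m := 2 * m) (by omega)
          have hpos := bitCount_pos m (by omega)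
          have e7 : 2 * m % 2 = 0 := by omega
          have e8 : 2 * m / 2 = m := by omega
          rw [e7, e8] at hdbl
          omega
        have hA : ¬(PySem.List.pyGetD a (PySem.Int.floordiv N 2) ' ' = c ∧
            (0:Int) + myc (PySem.Int.floordiv N 2 + 1) - myc (PySem.Int.floordiv N 2) = 0) :=
          fun hx => hAfalse hx.2
        have hB : ¬(PySem.Int.mod N 2 = 1 ∧ okB N (PySem.Int.floordiv N 2) = true) :=
          fun hx => hBfalse hx.2
        rw [if_neg hA, if_neg hB]
        apply parity_eq
        simp [List.countP_cons, List.countP_nil, beq_iff_eq]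
        split_ifs <;> omega
    · have hB : ¬(PySem.Int.mod N 2 = 1 ∧ okB N (PySem.Int.floordiv N 2) = true) :=
        fun hx => hr1 hx.1
      rw [if_neg hr1, if_neg hB]
      apply parity_eq
      simp [List.countP_cons, List.countP_nil, beq_iff_eq]
      split_ifs <;> omega

-- ===== VERDICT (by name: the statement is the Claim_ definition above) =====
theorem find_x_N_1_spec : Claim_equal_find_x_N_1 := by
  unfold Claim_equal_find_x_N_1
  intro N a _ hpre
  unfold Spec_find_x_N_1
  obtain ⟨hL, hU, hodd⟩ := hpre
  have hmod11 : PySem.Int.mod (1 : Int) 2 = 1 := by decide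
  have hmodm1 : PySem.Int.mod (-1 : Int) 2 = 1 := by decide
  have hA1 : ¬(N = 1 ∧ PySem.List.pyGetD a.toList 0 ' ' =
      (if PySem.Str.isIn "2" a then '2' else '3')) := by
    rintro ⟨rfl, hch⟩
    exact ((hodd hmod11).2.1) ⟨rfl, hch⟩
  have hAm1 : ¬(N = -1 ∧ PySem.List.pyGetD a.toList (-1) ' ' =
      (if PySem.Str.isIn "2" a then '2' else '3')) := by
    rintro ⟨rfl, hch⟩
    exact ((hodd hmodm1).2.2) ⟨rfl, hch⟩
  unfold find_x_N_1 find_x_N_1_alt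
  by_cases hin : PySem.Str.isIn "2" a = true
  · rw [if_pos hin] at hA1 hAm1
    rw [if_pos hin, if_pos hin, if_pos (by decide : ('2' == '2') = true),
        func_eq N a.toList '2' hA1 hAm1]
  · rw [if_neg hin] at hA1 hAm1
    rw [if_neg hin, if_neg hin, if_neg (by decide : ¬ ('3' == '2') = true),
        func_eq N a.toList '3' hA1 hAm1]
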